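-- pv_equiv track=rewrite | github.com/hammerchu/JDE10_02 | group4.py | memberThree
-- ===== SOURCE A (Python) =====
-- text = 'C:/Users/KK Chan/Desktop/JDE10/JDE10_02/news.txt'
--
-- def memberThree(text):
--     reversed_lines = []
--     lines = text.split('\n')
--     for line in lines:
--         reversed_line = ''
--         i = 0
--         while i < len(line):
--             if line[i].isspace() or not line[i].isalpha():
--                 reversed_line += line[i]
--                 i += 1
--             else:
--                 start = i
--                 while i < len(line) and line[i].isalpha():
--                     i += 1
--                 word = line[start:i]
--                 reversed_line += word[::-1]
--         reversed_lines.append(reversed_line)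
--     reversed_text = '\n'.join(reversed_lines)
--     return reversed_text
-- ===== SOURCE B (Python) =====
-- def memberThree(text):
--     out = []
--     word = []
--     for ch in text:
--         if ch.isalpha():
--             word.append(ch)
--         else:
--             out.extend(reversed(word))
--             word.clear()
--             out.append(ch)
--     out.extend(reversed(word))
--     return ''.join(out)
-- ===== Notes on version B (the rewrite author's own statement) =====
-- stated objective: simpler
-- what changed: Replaced split-on-newlines plus a nested index/slice while-loop per line by a single left-to-right pass over the whole text with a pending-word buffer that is flushed reversed at each non-alphabetic character.
import Mathlib
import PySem

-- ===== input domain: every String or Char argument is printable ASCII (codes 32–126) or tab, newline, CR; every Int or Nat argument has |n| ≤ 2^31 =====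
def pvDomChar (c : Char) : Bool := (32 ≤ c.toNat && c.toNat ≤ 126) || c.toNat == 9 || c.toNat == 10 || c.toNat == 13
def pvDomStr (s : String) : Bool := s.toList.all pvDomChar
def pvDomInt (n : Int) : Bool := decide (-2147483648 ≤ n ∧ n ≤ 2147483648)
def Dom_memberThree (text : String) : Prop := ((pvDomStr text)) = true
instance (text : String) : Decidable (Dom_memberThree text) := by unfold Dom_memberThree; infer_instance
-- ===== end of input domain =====

-- B rewrites A's split-lines + nested index/slice while-loop as one pass over the whole
-- text with a pending-word buffer flushed reversed at each non-alphabetic character (simpler).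

-- ===== PORT A =====
-- A's inner while-loop over one line: emit non-letters verbatim, emit each maximal
-- alphabetic run (word = line[start:i], appended as word[::-1]) reversed; the index
-- pair (start, i) becomes the obvious structural recursion on the remaining suffix
def pvProcLine : List Char → List Char
  | [] => []
  | d :: t =>
    if PySem.Chars.isspace d || !(PySem.Chars.isalpha d) then
      d :: pvProcLine t
    else
      ((d :: t).takeWhile PySem.Chars.isalpha).reverse ++
        pvProcLine ((d :: t).dropWhile PySem.Chars.isalpha)
  termination_by l => l.length
  decreasing_by
    · simp
    · simp_all [List.dropWhile]
      have := List.length_dropWhile_le PySem.Chars.isalpha t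
      omega

def memberThree (text : String) : String :=
  -- lines = text.split('\n'); the per-line loop is pvProcLine; '\n'.join(...)
  String.ofList (PySem.Chars.join ['\n']
    ((PySem.Chars.splitOn text.toList ['\n']).map pvProcLine))

-- ===== PORT B =====
-- B's single for-loop: `word` is the pending alphabetic buffer, flushed reversed
-- (out.extend(reversed(word))) at each non-letter and once more at the end
def pvBGo : List Char → List Char → List Char
  | word, [] => word.reverse
  | word, ch :: rest =>
    if PySem.Chars.isalpha ch then pvBGo (word ++ [ch]) rest
    else word.reverse ++ ch :: pvBGo [] rest

def memberThree_alt (text : String) : String :=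
  String.ofList (pvBGo [] text.toList)

-- ===== PRECONDITION & SPEC =====
def Spec_memberThree (text : String) (out : String) : Prop := out = memberThree_alt text
instance (text : String) (out : String) : Decidable (Spec_memberThree text out) := by unfold Spec_memberThree; infer_instance

-- ===== CLAIM (what is proved, stated in full; the proofs are below) =====
def Claim_equal_memberThree : Prop := ∀ (text : String), Dom_memberThree text → Spec_memberThree text (memberThree text)

-- ===== LEMMAS AND PROOFS =====

-- reference single-char split used to characterise PySem.Chars.splitOn
def pvSplit (c : Char) : List Char → List (List Char)
  | [] => [[]]
  | d :: t =>
    let r := pvSplit c t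
    if d = c then [] :: r else (d :: r.headI) :: r.tail

theorem pvSplit_ne_nil (c : Char) (l : List Char) : pvSplit c l ≠ [] := by
  cases l with
  | nil => simp [pvSplit]
  | cons d t => simp only [pvSplit]; split <;> simp

theorem pvSplit_cons (c : Char) (l : List Char) :
    (pvSplit c l).headI :: (pvSplit c l).tail = pvSplit c l := by
  have := pvSplit_ne_nil c l
  cases h : pvSplit c l with
  | nil => exact absurd h this
  | cons a b => simp

theorem splitOn_go_nil (sep cur : List Char) (acc : List (List Char)) (fuel : Nat) :
    PySem.Chars.splitOn.go sep fuel [] cur acc = (cur.reverse :: acc).reverse := by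
  cases fuel <;> rw [PySem.Chars.splitOn.go] <;> simp

theorem splitOn_go_cons (sep : List Char) (fuel : Nat) (c : Char) (rest cur : List Char)
    (acc : List (List Char)) :
    PySem.Chars.splitOn.go sep (fuel + 1) (c :: rest) cur acc =
      if sep.isPrefixOf (c :: rest) then
        PySem.Chars.splitOn.go sep fuel (List.drop sep.length (c :: rest)) [] (cur.reverse :: acc)
      else PySem.Chars.splitOn.go sep fuel rest (c :: cur) acc := by
  rw [PySem.Chars.splitOn.go]

theorem splitOn_go_spec (c : Char) (fuel : Nat) (l cur : List Char)
    (acc : List (List Char)) (hf : l.length < fuel) :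
    PySem.Chars.splitOn.go [c] fuel l cur acc =
      acc.reverse ++ (cur.reverse ++ (pvSplit c l).headI) :: (pvSplit c l).tail := by
  induction fuel generalizing l cur acc with
  | zero => omega
  | succ fuel ih =>
    cases l with
    | nil => rw [splitOn_go_nil]; simp [pvSplit]
    | cons d t =>
      rw [splitOn_go_cons]
      by_cases hd : d = c
      · subst hd
        have hpre : List.isPrefixOf [d] (d :: t) = true := by simp [List.isPrefixOf]
        rw [hpre, if_pos rfl]
        rw [show List.drop [d].length (d :: t) = t from rfl]
        rw [ih t [] (cur.reverse :: acc) (by simp at hf ⊢; omega)]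
        simp [pvSplit, pvSplit_cons]
      · have hpre : List.isPrefixOf [c] (d :: t) = false := by
          simp [List.isPrefixOf]; exact fun h => absurd h.symm hd
        rw [hpre]
        simp only [Bool.false_eq_true, if_false]
        rw [ih t (d :: cur) acc (by simp at hf ⊢; omega)]
        simp [pvSplit, hd]

theorem splitOn_eq_pvSplit (c : Char) (l : List Char) :
    PySem.Chars.splitOn l [c] = pvSplit c l := by
  unfold PySem.Chars.splitOn
  rw [splitOn_go_spec c (l.length + 1) l [] [] (by omega)]
  simp [pvSplit_cons]

theorem isspace_of_alpha (d : Char) (h : PySem.Chars.isalpha d = true) :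
    PySem.Chars.isspace d = false := by
  have h9 : 65 ≤ d.toNat ∧ d.toNat ≤ 90 ∨ 97 ≤ d.toNat ∧ d.toNat ≤ 122 := by
    simp only [PySem.Chars.isalpha, PySem.Chars.isupper, PySem.Chars.islower,
      Bool.or_eq_true, Bool.and_eq_true, decide_eq_true_eq] at h
    rcases h with ⟨h1, h2⟩ | ⟨h1, h2⟩
    · left; exact ⟨h1, h2⟩
    · right; exact ⟨h1, h2⟩
  simp only [PySem.Chars.isspace, Bool.or_eq_false_iff, Bool.and_eq_false_iff,
    decide_eq_false_iff_not]
  omega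

theorem newline_not_alpha : PySem.Chars.isalpha '\n' = false := by decide

theorem takeWhile_alpha_append (t b : List Char) :
    List.takeWhile PySem.Chars.isalpha (t ++ '\n' :: b) =
      List.takeWhile PySem.Chars.isalpha t := by
  rw [List.takeWhile_append]
  split
  · rename_i hlen
    have ht : List.takeWhile PySem.Chars.isalpha t = t :=
      (List.takeWhile_prefix _).eq_of_length hlen
    simp [List.takeWhile_cons, newline_not_alpha, ht]
  · rfl

theorem dropWhile_alpha_append (t b : List Char) :
    List.dropWhile PySem.Chars.isalpha (t ++ '\n' :: b) =
      List.dropWhile PySem.Chars.isalpha t ++ '\n' :: b := by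
  rw [List.dropWhile_append]
  split
  · rename_i hemp
    have ht : List.dropWhile PySem.Chars.isalpha t = [] := by simpa using hemp
    simp [List.dropWhile_cons, newline_not_alpha, ht]
  · rfl

-- what pvProcLine does, restated as one flush step regardless of the head character
theorem procLine_flush (l : List Char) :
    pvProcLine l =
      (l.takeWhile PySem.Chars.isalpha).reverse ++
        pvProcLine (l.dropWhile PySem.Chars.isalpha) := by
  cases l with
  | nil => simp [pvProcLine]
  | cons d t =>
    by_cases h : PySem.Chars.isalpha d = true
    · rw [pvProcLine]
      simp [isspace_of_alpha d h, h]
    · simp [List.takeWhile_cons, List.dropWhile_cons, h]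

-- A's per-line loop distributes over an embedded newline
theorem procLine_append_newline (a b : List Char) :
    pvProcLine (a ++ '\n' :: b) = pvProcLine a ++ '\n' :: pvProcLine b := by
  induction ha : a.length using Nat.strong_induction_on generalizing a with
  | _ n ih =>
    subst ha
    cases a with
    | nil =>
      have hc : (PySem.Chars.isspace '\n' || !PySem.Chars.isalpha '\n') = true := by decide
      have hme : pvProcLine ('\n' :: b) = '\n' :: pvProcLine b := by
        rw [pvProcLine, if_pos hc]
      rw [List.nil_append, hme]
      simp [pvProcLine]
    | cons d t =>
      by_cases h : PySem.Chars.isalpha d = true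
      · have hs := isspace_of_alpha d h
        have hc : (PySem.Chars.isspace d || !PySem.Chars.isalpha d) = false := by
          simp [hs, h]
        rw [List.cons_append, pvProcLine, if_neg (by simp [hc]), pvProcLine,
          if_neg (by simp [hc])]
        simp only [List.takeWhile_cons, List.dropWhile_cons, h, if_pos]
        rw [takeWhile_alpha_append, dropWhile_alpha_append]
        rw [ih (List.dropWhile PySem.Chars.isalpha t).length
          (by have := List.length_dropWhile_le PySem.Chars.isalpha t; simp; omega) _ rfl]
        simp
      · have hc : (PySem.Chars.isspace d || !PySem.Chars.isalpha d) = true := by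
          simp [h]
        rw [List.cons_append, pvProcLine, if_pos hc, pvProcLine, if_pos hc]
        rw [ih t.length (by simp) t rfl]
        simp

theorem exists_first_newline (s : List Char) (h : '\n' ∈ s) :
    ∃ a b, s = a ++ '\n' :: b ∧ '\n' ∉ a := by
  induction s with
  | nil => cases h
  | cons c t ih =>
    by_cases hc : c = '\n'
    · exact ⟨[], t, by simp [hc], by simp⟩
    · have ht : '\n' ∈ t := by
        rcases List.mem_cons.mp h with h' | h'
        · exact absurd h'.symm hc
        · exact h'
      obtain ⟨a, b, h1, h2⟩ := ih ht
      exact ⟨c :: a, b, by simp [h1], by simp [h2]; exact fun hx => hc hx.symm⟩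

theorem pvSplit_no_newline (a : List Char) (h : '\n' ∉ a) :
    pvSplit '\n' a = [a] := by
  induction a with
  | nil => simp [pvSplit]
  | cons d t ih =>
    have hd : d ≠ '\n' := fun hc => h (by simp [hc])
    have := ih (fun hx => h (by simp [hx]))
    simp [pvSplit, hd, this]

theorem pvSplit_append_newline (a b : List Char) (h : '\n' ∉ a) :
    pvSplit '\n' (a ++ '\n' :: b) = a :: pvSplit '\n' b := by
  induction a with
  | nil => simp [pvSplit, pvSplit_cons]
  | cons d t ih =>
    have hd : d ≠ '\n' := fun hc => h (by simp [hc])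
    have hih := ih (fun hx => h (by simp [hx]))
    simp only [List.cons_append, pvSplit, hih, hd, if_false]
    simp

theorem join_map_procLine (s : List Char) :
    PySem.Chars.join ['\n'] ((pvSplit '\n' s).map pvProcLine) = pvProcLine s := by
  induction hs : s.length using Nat.strong_induction_on generalizing s with
  | _ n ih =>
    subst hs
    by_cases hnl : '\n' ∈ s
    · obtain ⟨a, b, hsplit, hfree⟩ := exists_first_newline s hnl
      subst hsplit
      rw [pvSplit_append_newline a b hfree, procLine_append_newline]
      have hbne := pvSplit_ne_nil '\n' b
      rw [List.map_cons]
      cases hpb : (pvSplit '\n' b).map pvProcLine with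
      | nil => simp_all
      | cons p ps =>
        rw [PySem.Chars.join_cons_cons]
        rw [← hpb, ih b.length (by simp; omega) b rfl]
        simp
    · rw [pvSplit_no_newline s hnl]
      simp [PySem.Chars.join_singleton]

-- B's loop expressed through A's per-line recursion
theorem bGo_spec (rest word : List Char) :
    pvBGo word rest =
      (word ++ rest.takeWhile PySem.Chars.isalpha).reverse ++
        pvProcLine (rest.dropWhile PySem.Chars.isalpha) := by
  induction rest generalizing word with
  | nil => simp [pvBGo, pvProcLine]
  | cons ch r ih =>
    by_cases h : PySem.Chars.isalpha ch = true
    · rw [pvBGo, if_pos h]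
      simp only [List.takeWhile_cons, List.dropWhile_cons, h, if_pos]
      rw [ih (word ++ [ch])]
      simp
    · rw [pvBGo, if_neg (by simp [h])]
      simp only [List.takeWhile_cons, List.dropWhile_cons, h]
      rw [ih []]
      have hpl : pvProcLine (ch :: r) =
          ch :: ((r.takeWhile PySem.Chars.isalpha).reverse ++
            pvProcLine (r.dropWhile PySem.Chars.isalpha)) := by
        rw [pvProcLine, if_pos (by simp [h])]
        rw [procLine_flush r]
      simp [hpl]

theorem procLine_eq_bGo (s : List Char) : pvProcLine s = pvBGo [] s := by
  rw [bGo_spec s [], List.nil_append, ← procLine_flush]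

-- ===== VERDICT (by name: the statement is the Claim_ definition above) =====
theorem memberThree_spec : Claim_equal_memberThree := by
  intro text _
  unfold Spec_memberThree memberThree memberThree_alt
  rw [splitOn_eq_pvSplit, join_map_procLine, procLine_eq_bGo]
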